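-- pv_equiv track=rewrite | github.com/TIGLIOPROJECT/AIO_conversion | leiden_plus.py | section_split
-- ===== SOURCE A (Python) =====
-- def section_split(text):
--     """ Divisions between 'sections' of text in are currently only loosely
--         indicated by multiple blank lines between them. """
--     lines = [line.strip() for line in text.split('\n')]
--     sections = []
--     acc = []
--     count = 0
--     for l in lines:
--         if not l:
--             count += 1
--             if count > 1 and acc:
--                 sections.append(acc)
--                 acc = []
--                 count = 0
--         else:
--             count = 0
--             acc.append(l)
--     if acc:
--         sections.append(acc)
--     return sections
-- ===== SOURCE B (Python) =====
-- def section_split(text):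
--     """Gap-based grouping: skip blank lines entirely; a non-blank line starts a
--     new section exactly when the index gap to the previous non-blank line is >= 3
--     (i.e. at least two blank lines lie between them); otherwise it joins the
--     open section. No blank counter, no final flush."""
--     lines = [line.strip() for line in text.split('\n')]
--     sections = []
--     prev = None
--     for i, l in enumerate(lines):
--         if l:
--             if prev is None or i - prev >= 3:
--                 sections.append([l])
--             else:
--                 sections[-1].append(l)
--             prev = i
--     return sections
-- ===== Notes on version B (the rewrite author's own statement) =====
-- stated objective: alternative
-- what changed: Replaces A's blank-counter/flush state machine by gap-based grouping: blank lines are skipped entirely and a non-blank line opens a new section exactly when its index is at least 3 past the previous non-blank line (i.e. >=2 blanks between them), otherwise it joins the open section.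
import Mathlib
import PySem

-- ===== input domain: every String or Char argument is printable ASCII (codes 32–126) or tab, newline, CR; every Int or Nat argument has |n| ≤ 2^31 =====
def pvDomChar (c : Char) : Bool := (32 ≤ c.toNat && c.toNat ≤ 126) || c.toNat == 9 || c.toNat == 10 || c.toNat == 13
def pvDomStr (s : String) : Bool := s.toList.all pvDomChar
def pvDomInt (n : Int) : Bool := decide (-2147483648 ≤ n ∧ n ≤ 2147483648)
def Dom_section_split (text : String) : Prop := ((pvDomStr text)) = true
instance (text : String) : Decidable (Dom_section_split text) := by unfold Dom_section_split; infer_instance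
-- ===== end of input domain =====

-- B replaces A's blank-counter state machine by gap-based grouping over the
-- enumerated non-blank lines (objective: alternative; same O(n) cost).

-- ===== PORT A =====
-- loop body of A: state = (sections, acc, count)
def pvStepA (st : List (List String) × List String × Int) (l : String) :
    List (List String) × List String × Int :=
  if l = "" then
    let count := st.2.2 + 1
    if 1 < count ∧ st.2.1 ≠ [] then (st.1 ++ [st.2.1], [], 0)
    else (st.1, st.2.1, count)
  else (st.1, st.2.1 ++ [l], 0)

-- A's trailing 'if acc: sections.append(acc)'
def pvFinishA (st : List (List String) × List String × Int) : List (List String) :=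
  if st.2.1 ≠ [] then st.1 ++ [st.2.1] else st.1

def section_split (text : String) : List (List String) :=
  let lines := ((PySem.Str.split? text "\n").getD []).map PySem.Str.strip
  pvFinishA (lines.foldl pvStepA ([], [], 0))

-- ===== PORT B =====
-- 'sections[-1].append(l)': append l to the last section.
-- (Python would raise IndexError on an empty sections; B only reaches this with
-- prev set, which implies sections ≠ [], so the [] branch is unreachable.)
def pvAppendLast (secs : List (List String)) (l : String) : List (List String) :=
  match secs with
  | [] => []
  | [s] => [s ++ [l]]
  | s :: rest => s :: pvAppendLast rest l

-- loop body of B: state = (sections, prev); p = (i, l) from enumerate.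
-- 'i - prev >= 3' is written '3 ≤ p.1 - q', exactly Python's int subtraction.
def pvStepB (st : List (List String) × Option Int) (p : Int × String) :
    List (List String) × Option Int :=
  if p.2 ≠ "" then
    match st.2 with
    | none => (st.1 ++ [[p.2]], some p.1)
    | some q =>
        if 3 ≤ p.1 - q then (st.1 ++ [[p.2]], some p.1)
        else (pvAppendLast st.1 p.2, some p.1)
  else st

def section_split_alt (text : String) : List (List String) :=
  let lines := ((PySem.Str.split? text "\n").getD []).map PySem.Str.strip
  ((PySem.List.enumerate lines 0).foldl pvStepB ([], none)).1

-- ===== PRECONDITION & SPEC =====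
def Spec_section_split (text : String) (out : List (List String)) : Prop := out = section_split_alt text
instance (text : String) (out : List (List String)) : Decidable (Spec_section_split text out) := by unfold Spec_section_split; infer_instance

-- ===== CLAIM (what is proved, stated in full; the proofs are below) =====
def Claim_equal_section_split : Prop := ∀ (text : String), Dom_section_split text → Spec_section_split text (section_split text)

-- ===== LEMMAS AND PROOFS =====

-- relation between A's loop state and B's loop state at position i
def pvInv (i : Int) (secsA : List (List String)) (acc : List String) (count : Int)
    (secsB : List (List String)) (prev : Option Int) : Prop :=
  (acc = [] → secsB = secsA ∧ (prev = none ∨ ∃ p, prev = some p ∧ p + 3 ≤ i)) ∧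
  (acc ≠ [] → secsB = secsA ++ [acc] ∧
      ∃ p, prev = some p ∧ (count = 0 ∨ count = 1) ∧ p + 1 + count = i)

lemma pvAppendLast_snoc (xs : List (List String)) (s : List String) (l : String) :
    pvAppendLast (xs ++ [s]) l = xs ++ [s ++ [l]] := by
  induction xs with
  | nil => rfl
  | cons a xs ih =>
      cases h : xs ++ [s] with
      | nil => simp at h
      | cons b t => simp [pvAppendLast, ih]

lemma pvLoop_eq (ls : List String) :
    ∀ (i : Int) (secsA : List (List String)) (acc : List String) (count : Int)
      (secsB : List (List String)) (prev : Option Int),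
      pvInv i secsA acc count secsB prev →
      pvFinishA (ls.foldl pvStepA (secsA, acc, count))
        = ((PySem.List.enumerate ls i).foldl pvStepB (secsB, prev)).1 := by
  induction ls with
  | nil =>
      intro i sA acc c sB prev h
      by_cases ha : acc = [] <;>
        simp_all [pvInv, pvFinishA, PySem.List.enumerate_nil]
  | cons l t ih =>
      intro i sA acc c sB prev h
      rw [PySem.List.enumerate_cons, List.foldl_cons, List.foldl_cons]
      by_cases hl : l = ""
      · -- blank line: B skips, A counts
        have hB : pvStepB (sB, prev) (i, l) = (sB, prev) := by
          simp [pvStepB, hl]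
        rw [hB]
        by_cases ha : acc = []
        · -- no open section: A just increments count
          have hA : pvStepA (sA, acc, c) l = (sA, acc, c + 1) := by
            simp [pvStepA, hl, ha]
          rw [hA]
          apply ih
          rcases h.1 ha with ⟨hs, hp⟩
          refine ⟨fun _ => ⟨hs, ?_⟩, fun hne => absurd ha hne⟩
          rcases hp with hp | ⟨p, hp, hle⟩
          · exact Or.inl hp
          · exact Or.inr ⟨p, hp, by omega⟩
        · -- open section
          rcases h.2 ha with ⟨hs, p, hp, hc, hpi⟩
          rcases hc with hc | hc
          · -- first blank after content
            have hA : pvStepA (sA, acc, c) l = (sA, acc, c + 1) := by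
              simp [pvStepA, hl, hc]
            rw [hA]
            apply ih
            exact ⟨fun hx => absurd hx ha,
              fun _ => ⟨hs, p, hp, by omega, by omega⟩⟩
          · -- second blank: A flushes
            have hA : pvStepA (sA, acc, c) l = (sA ++ [acc], [], 0) := by
              simp [pvStepA, hl, ha, hc]
            rw [hA]
            apply ih
            exact ⟨fun _ => ⟨hs, Or.inr ⟨p, hp, by omega⟩⟩,
              fun hne => absurd rfl hne⟩
      · -- content line
        have hA : pvStepA (sA, acc, c) l = (sA, acc ++ [l], 0) := by
          simp [pvStepA, hl]
        rw [hA]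
        by_cases ha : acc = []
        · -- B starts a new section
          rcases h.1 ha with ⟨hs, hp⟩
          have hB : pvStepB (sB, prev) (i, l) = (sA ++ [[l]], some i) := by
            rcases hp with hp | ⟨p, hp, hle⟩
            · simp [pvStepB, hl, hp, hs]
            · simp [pvStepB, hl, hp, hs, show (3 : Int) ≤ i - p by omega]
          rw [hB]
          apply ih
          subst ha
          exact ⟨fun hx => by simp at hx,
            fun _ => ⟨by simp, i, rfl, Or.inl rfl, by omega⟩⟩
        · -- B appends to the open (last) section
          rcases h.2 ha with ⟨hs, p, hp, hc, hpi⟩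
          have hB : pvStepB (sB, prev) (i, l) = (sA ++ [acc ++ [l]], some i) := by
            have hlt : ¬ (3 : Int) ≤ i - p := by omega
            simp [pvStepB, hl, hp, hlt, hs, pvAppendLast_snoc]
          rw [hB]
          apply ih
          exact ⟨fun hx => by simp at hx,
            fun _ => ⟨rfl, i, rfl, Or.inl rfl, by omega⟩⟩

-- ===== VERDICT (by name: the statement is the Claim_ definition above) =====
theorem section_split_spec : Claim_equal_section_split := by
  intro text _
  show section_split text = section_split_alt text
  unfold section_split section_split_alt
  exact pvLoop_eq _ 0 [] [] 0 [] none ⟨fun _ => ⟨rfl, Or.inl rfl⟩, fun h => absurd rfl h⟩
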